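-- pv_equiv track=rewrite | github.com/thealper2/codewars-solutions | 7-kyu/sevenate9.py | seven_ate9
-- ===== SOURCE A (Python) =====
-- def seven_ate9(str_):
--     n = len(str_)
--     i = 0
--     result = list(str_)
--
--     while i < n - 2:
--         if result[i] == '7' and result[i + 1] == '9' and result[i + 2] == '7':
--             del result[i + 1]
--             n -= 1
--         else:
--             i += 1
--
--     return ''.join(result)
-- ===== SOURCE B (Python) =====
-- def seven_ate9(str_):
--     stack = []
--     for ch in str_:
--         if ch == '7' and len(stack) >= 2 and stack[-1] == '9' and stack[-2] == '7':
--             stack.pop()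
--         stack.append(ch)
--     return ''.join(stack)
-- ===== Notes on version B (the rewrite author's own statement) =====
-- stated objective: faster
-- what changed: replaced the restarting index/delete-in-place scan with a single left-to-right pass over a stack that pops the '9' when a '7' arrives above '7','9'
import Mathlib
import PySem

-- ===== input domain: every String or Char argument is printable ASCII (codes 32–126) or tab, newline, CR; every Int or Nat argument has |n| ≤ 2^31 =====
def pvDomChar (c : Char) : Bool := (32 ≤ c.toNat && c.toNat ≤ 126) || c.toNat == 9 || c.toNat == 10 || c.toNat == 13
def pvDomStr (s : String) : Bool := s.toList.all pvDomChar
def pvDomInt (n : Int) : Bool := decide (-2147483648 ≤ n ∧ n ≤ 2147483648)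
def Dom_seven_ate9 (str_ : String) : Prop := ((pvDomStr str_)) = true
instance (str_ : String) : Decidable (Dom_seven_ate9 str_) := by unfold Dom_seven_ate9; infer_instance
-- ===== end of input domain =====

-- B replaces A's restarting index scan with in-place deletions by a single pass over a stack; return values proved equal on all inputs.

-- ===== PORT A =====
-- A's while loop: index i over the mutable list, delete result[i+1] on a seven-nine-seven
-- window (n shrinks by 1, i stays), else i += 1.  n is carried exactly as in A; the
-- Python indexing result[i..i+2] (always in range under the guard i < n - 2 with
-- n = length, as in A) is `l[k]?`.
def sevenLoopA (result : List Char) (i n : Nat) : List Char :=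
  if i < n - 2 then
    if result[i]? = some '7' ∧ result[i+1]? = some '9' ∧ result[i+2]? = some '7' then
      sevenLoopA (result.eraseIdx (i+1)) i (n-1)
    else
      sevenLoopA result (i+1) n
  else result
termination_by n - i
decreasing_by all_goals omega

def seven_ate9 (str_ : String) : String :=
  String.ofList (sevenLoopA str_.toList 0 str_.toList.length)

-- ===== PORT B =====
-- B's stack step (stack held top-first, i.e. reversed): when the incoming char is a seven and the
-- top two of the stack are nine over seven, first pop the nine.
def stepB (rev : List Char) (c : Char) : List Char :=
  match rev with
  | b :: a :: t => if c = '7' ∧ b = '9' ∧ a = '7' then c :: a :: t else c :: rev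
  | _ => c :: rev

def seven_ate9_alt (str_ : String) : String :=
  String.ofList ((str_.toList.foldl stepB []).reverse)

-- ===== PRECONDITION & SPEC =====
def Spec_seven_ate9 (str_ : String) (out : String) : Prop := out = seven_ate9_alt str_
instance (str_ : String) (out : String) : Decidable (Spec_seven_ate9 str_ out) := by unfold Spec_seven_ate9; infer_instance

-- ===== CLAIM (what is proved, stated in full; the proofs are below) =====
def Claim_equal_seven_ate9 : Prop := ∀ (str_ : String), Dom_seven_ate9 str_ → Spec_seven_ate9 str_ (seven_ate9 str_)

-- ===== LEMMAS AND PROOFS =====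

-- a seven-nine-seven window of l starting at index j
def Win (l : List Char) (j : Nat) : Prop :=
  l[j]? = some '7' ∧ l[j+1]? = some '9' ∧ l[j+2]? = some '7'

-- Invariant: while scanning at index i A has verified that no such window starts
-- before i; then the rest of A's run equals B's fold continued from the stack
-- holding the first i+2 characters.
theorem loop_eq (l : List Char) (i : Nat) (h : ∀ j, j < i → ¬ Win l j) :
    sevenLoopA l i l.length =
      ((l.drop (i+2)).foldl stepB ((l.take (i+2)).reverse)).reverse := by
  rw [sevenLoopA]
  by_cases hlt : i < l.length - 2
  · have hi2 : i + 2 < l.length := by omega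
    have hi1 : i + 1 < l.length := by omega
    have hi0 : i < l.length := by omega
    rw [if_pos hlt]
    by_cases hm : l[i]? = some '7' ∧ l[i+1]? = some '9' ∧ l[i+2]? = some '7'
    · rw [if_pos hm]
      obtain ⟨h7, h9, h7'⟩ := hm
      have hlen' : (l.eraseIdx (i+1)).length = l.length - 1 := by
        rw [List.length_eraseIdx]; rw [if_pos hi1]
      have h' : ∀ j, j < i → ¬ Win (l.eraseIdx (i+1)) j := by
        intro j hj W
        obtain ⟨w1, w2, w3⟩ := W
        rw [List.getElem?_eraseIdx, if_pos (by omega : j < i + 1)] at w1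
        rw [List.getElem?_eraseIdx, if_pos (by omega : j + 1 < i + 1)] at w2
        rw [List.getElem?_eraseIdx] at w3
        by_cases hc : j + 2 < i + 1
        · rw [if_pos hc] at w3
          exact h j hj ⟨w1, w2, w3⟩
        · have hji : j + 1 = i := by omega
          rw [hji, h7] at w2
          simp at w2
      have hrec := loop_eq (l.eraseIdx (i+1)) i h'
      rw [← hlen', hrec]
      -- rewrite the erased list's take/drop in terms of l
      have e0 : l.eraseIdx (i+1) = l.take (i+1) ++ l.drop (i+2) :=
        List.eraseIdx_eq_take_drop_succ ..
      have hlt1 : (l.take (i+1)).length = i + 1 := by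
        simp [List.length_take]; omega
      have e3 : l.drop (i+2) = '7' :: l.drop (i+3) := by
        rw [List.drop_eq_getElem_cons hi2]
        have : some l[i+2] = some '7' := by rw [← List.getElem?_eq_getElem hi2, h7']
        rw [Option.some_inj.mp this]
      have e1 : (l.eraseIdx (i+1)).drop (i+2) = l.drop (i+3) := by
        rw [e0, List.drop_append, hlt1, e3]
        have h12 : i + 2 - (i + 1) = 1 := by omega
        rw [h12]
        simp [List.drop_eq_nil_of_le (by omega : (l.take (i+1)).length ≤ i + 2)]
      have e2 : (l.eraseIdx (i+1)).take (i+2) = l.take (i+1) ++ ['7'] := by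
        rw [e0, List.take_append, hlt1, e3]
        have h12 : i + 2 - (i + 1) = 1 := by omega
        rw [h12]
        simp [List.take_of_length_le (by omega : (l.take (i+1)).length ≤ i + 2)]
      have t5 : l.take (i+1) = l.take i ++ ['7'] := by
        rw [List.take_add_one]
        have : l[i]? = some '7' := h7
        rw [this]; rfl
      have t4 : l.take (i+2) = (l.take i ++ ['7']) ++ ['9'] := by
        rw [List.take_add_one]
        rw [h9, ← t5]; rfl
      rw [e1, e2, e3, t4, t5]
      simp [stepB]
    · rw [if_neg hm]
      have h' : ∀ j, j < i + 1 → ¬ Win l j := by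
        intro j hj W
        rcases Nat.lt_or_ge j i with hji | hji
        · exact h j hji W
        · have : j = i := by omega
          subst this
          exact hm W
      have hrec := loop_eq l (i+1) h'
      rw [hrec]
      have e3 : l.drop (i+2) = l[i+2] :: l.drop (i+3) := List.drop_eq_getElem_cons hi2
      have t5 : l.take (i+1) = l.take i ++ [l[i]] := by
        rw [List.take_add_one, List.getElem?_eq_getElem hi0]; rfl
      have t4 : l.take (i+2) = (l.take i ++ [l[i]]) ++ [l[i+1]] := by
        rw [List.take_add_one, List.getElem?_eq_getElem hi1, ← t5]; rfl
      have t6 : l.take (i+3) = ((l.take i ++ [l[i]]) ++ [l[i+1]]) ++ [l[i+2]] := by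
        rw [List.take_add_one, List.getElem?_eq_getElem hi2, ← t4]; rfl
      rw [e3, t4, t6]
      simp only [List.foldl_cons, List.reverse_append, List.reverse_cons,
        List.reverse_nil, List.nil_append, List.cons_append]
      rw [stepB]
      rw [if_neg]
      intro ⟨c1, c2, c3⟩
      exact hm ⟨by rw [List.getElem?_eq_getElem hi0, c3],
                by rw [List.getElem?_eq_getElem hi1, c2],
                by rw [List.getElem?_eq_getElem hi2, c1]⟩
  · rw [if_neg hlt]
    have hle : l.length ≤ i + 2 := by omega
    rw [List.take_of_length_le hle, List.drop_eq_nil_of_le hle]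
    simp
termination_by l.length - i
decreasing_by
  · rw [List.length_eraseIdx, if_pos hi1]; omega
  · omega

theorem seven_ate9_spec : Claim_equal_seven_ate9 := by
  intro s _
  unfold Spec_seven_ate9 seven_ate9 seven_ate9_alt
  have h0 : ∀ j, j < 0 → ¬ Win s.toList j := by omega
  rw [loop_eq s.toList 0 h0]
  congr 1
  match hl : s.toList with
  | [] => simp
  | [a] => simp [stepB]
  | a :: b :: t => simp [stepB]
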